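-- pv_equiv track=rewrite | github.com/kashishkap00r/company-chatter | scripts/build_site.py | _matches_trailing_initialism
-- ===== SOURCE A (Python) =====
-- def _matches_trailing_initialism(short_tokens: list[str], long_tokens: list[str]) -> bool:
--     shared_prefix = 0
--     for left, right in zip(short_tokens, long_tokens):
--         if left != right:
--             break
--         shared_prefix += 1
--
--     short_tail = short_tokens[shared_prefix:]
--     long_tail = long_tokens[shared_prefix:]
--     if len(short_tail) != 1 or len(long_tail) < 2:
--         return False
--
--     short_value = short_tail[0]
--     initials = "".join(token[0] for token in long_tail if token)
--     return len(short_value) >= 2 and short_value == initials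
-- ===== SOURCE B (Python) =====
-- def _matches_trailing_initialism(short_tokens: list[str], long_tokens: list[str]) -> bool:
--     # Declarative search: some split point k must make short = long's first k
--     # tokens followed by the initialism of the rest (with the required mismatch
--     # at k, so that the shared prefix is exactly k).
--     return any(
--         len(short_tokens) == k + 1
--         and short_tokens[:k] == long_tokens[:k]
--         and short_tokens[k] != long_tokens[k]
--         and len(short_tokens[k]) >= 2
--         and short_tokens[k] == "".join(t[:1] for t in long_tokens[k:])
--         for k in range(len(long_tokens) - 1)
--     )
-- ===== Notes on version B (the rewrite author's own statement) =====
-- stated objective: alternative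
-- what changed: Replaces A's iterative prefix-counting scan plus tail slicing by a declarative existential search with any() over candidate split points k, checking whether short equals long's first k tokens followed by the trailing initialism with a mismatch at k.
import Mathlib
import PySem

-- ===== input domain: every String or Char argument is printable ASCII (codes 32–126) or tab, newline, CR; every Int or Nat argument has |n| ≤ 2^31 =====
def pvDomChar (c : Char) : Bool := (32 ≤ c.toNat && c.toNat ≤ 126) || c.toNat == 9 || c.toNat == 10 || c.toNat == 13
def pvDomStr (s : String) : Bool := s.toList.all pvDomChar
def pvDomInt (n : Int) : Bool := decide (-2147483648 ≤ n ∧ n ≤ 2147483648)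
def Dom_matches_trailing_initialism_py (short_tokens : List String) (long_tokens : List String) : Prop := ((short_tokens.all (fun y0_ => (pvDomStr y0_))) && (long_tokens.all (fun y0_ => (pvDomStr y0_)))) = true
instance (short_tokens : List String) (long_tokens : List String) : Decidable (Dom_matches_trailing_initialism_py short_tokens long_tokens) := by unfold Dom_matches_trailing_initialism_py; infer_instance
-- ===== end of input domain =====

-- B replaces A's iterative prefix-counting scan plus tail slicing by an existential
-- search (any) over candidate split points k (objective: alternative).

-- ===== PORT A =====
-- the zip/break loop accumulating shared_prefix
def pvSharedPrefix : List String → List String → Nat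
  | a :: as, b :: bs => if a ≠ b then 0 else pvSharedPrefix as bs + 1
  | _, _ => 0

-- "".join(token[0] for token in ts if token): first char of each nonempty token
def pvInitialsA (ts : List String) : String :=
  String.ofList (ts.filterMap (fun t => t.toList.head?))

def matches_trailing_initialism_py (short_tokens : List String) (long_tokens : List String) : Bool :=
  let shared_prefix := pvSharedPrefix short_tokens long_tokens
  let short_tail := short_tokens.drop shared_prefix
  let long_tail := long_tokens.drop shared_prefix
  if short_tail.length ≠ 1 ∨ long_tail.length < 2 then false
  else
    let short_value := short_tail.headI   -- short_tail[0], in range since length = 1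
    let initials := pvInitialsA long_tail
    decide (2 ≤ short_value.toList.length) && (short_value == initials)

-- ===== PORT B =====
-- "".join(t[:1] for t in ts): t[:1] is t's first char for nonempty t, "" otherwise
def pvInitialsB (ts : List String) : String :=
  String.ofList (ts.filterMap (fun t => t.toList.head?))

-- the body of Source B's any(...) generator at split point k; indexing at k is
-- guarded by the earlier conjuncts (len(short)==k+1 and k < len(long)-1)
def pvCandOK (short_tokens : List String) (long_tokens : List String) (k : Nat) : Bool :=
  decide (short_tokens.length = k + 1)
  && decide (short_tokens.take k = long_tokens.take k)
  && (short_tokens.getD k "" != long_tokens.getD k "")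
  && decide (2 ≤ (short_tokens.getD k "").toList.length)
  && (short_tokens.getD k "" == pvInitialsB (long_tokens.drop k))

def matches_trailing_initialism_py_alt (short_tokens : List String) (long_tokens : List String) : Bool :=
  (List.range (long_tokens.length - 1)).any (fun k => pvCandOK short_tokens long_tokens k)

-- ===== PRECONDITION & SPEC =====
def Spec_matches_trailing_initialism_py (short_tokens : List String) (long_tokens : List String) (out : Bool) : Prop := out = matches_trailing_initialism_py_alt short_tokens long_tokens
instance (short_tokens : List String) (long_tokens : List String) (out : Bool) : Decidable (Spec_matches_trailing_initialism_py short_tokens long_tokens out) := by unfold Spec_matches_trailing_initialism_py; infer_instance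

-- ===== CLAIM (what is proved, stated in full; the proofs are below) =====
def Claim_equal_matches_trailing_initialism_py : Prop := ∀ (short_tokens : List String) (long_tokens : List String), Dom_matches_trailing_initialism_py short_tokens long_tokens → Spec_matches_trailing_initialism_py short_tokens long_tokens (matches_trailing_initialism_py short_tokens long_tokens)

-- ===== LEMMAS AND PROOFS =====
lemma A_cons (a : String) (as bs : List String) :
    matches_trailing_initialism_py (a :: as) (a :: bs) = matches_trailing_initialism_py as bs := by
  simp [matches_trailing_initialism_py, pvSharedPrefix]

lemma cand_succ (a b : String) (as bs : List String) (k : Nat) :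
    pvCandOK (a :: as) (b :: bs) (k + 1)
      = (decide (a = b) && pvCandOK as bs k) := by
  by_cases hab : a = b <;> simp [pvCandOK, hab]

lemma alt_cons (a : String) (as bs : List String) :
    matches_trailing_initialism_py_alt (a :: as) (a :: bs)
      = matches_trailing_initialism_py_alt as bs := by
  cases bs with
  | nil => simp [matches_trailing_initialism_py_alt]
  | cons d ds =>
      show (List.range (ds.length + 1)).any _ = (List.range ds.length.succ.pred).any _
      rw [List.range_succ_eq_map]
      simp only [Nat.succ_pred_eq_of_pos, List.any_cons, List.any_map]
      have h0 : pvCandOK (a :: as) (a :: d :: ds) 0 = false := by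
        simp [pvCandOK]
      rw [h0]
      simp only [Bool.false_or]
      congr 1
      funext k
      simp [Function.comp, cand_succ]

lemma AB_eq : ∀ (s l : List String),
    matches_trailing_initialism_py s l = matches_trailing_initialism_py_alt s l := by
  intro s
  induction s with
  | nil =>
      intro l
      have : ∀ k, pvCandOK [] l k = false := by intro k; simp [pvCandOK]
      simp [matches_trailing_initialism_py, matches_trailing_initialism_py_alt,
            pvSharedPrefix, this]
  | cons a as ih =>
      intro l
      cases l with
      | nil =>
          simp [matches_trailing_initialism_py, matches_trailing_initialism_py_alt,
                pvSharedPrefix]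
      | cons b bs =>
          by_cases hab : a = b
          · subst hab
            rw [A_cons, alt_cons, ih]
          · -- heads differ: shared prefix is 0
            cases as with
            | nil =>
                -- A reduces to the direct check; on B's side only k = 0 can fire
                have hk : ∀ k, k ≠ 0 → pvCandOK [a] (b :: bs) k = false := by
                  intro k hk0
                  cases k with
                  | zero => exact absurd rfl hk0
                  | succ m => simp [pvCandOK]
                cases bs with
                | nil =>
                    simp [matches_trailing_initialism_py, matches_trailing_initialism_py_alt,
                          pvSharedPrefix, hab]
                | cons d ds =>
                    have hmem : (List.range (d :: ds).length.succ.pred).any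
                        (fun k => pvCandOK [a] (b :: d :: ds) k)
                          = pvCandOK [a] (b :: d :: ds) 0 := by
                      show (List.range (ds.length + 1)).any _ = _
                      rw [List.range_succ_eq_map]
                      simp only [List.any_cons, List.any_map]
                      have : ((List.range ds.length).any
                          ((fun k => pvCandOK [a] (b :: d :: ds) k) ∘ Nat.succ)) = false := by
                        rw [List.any_eq_false]
                        intro k _
                        simp [Function.comp, pvCandOK]
                      rw [this, Bool.or_false]
                    have hba : (a != b) = true := by simp [bne_iff_ne]; exact hab
                    simp [matches_trailing_initialism_py, matches_trailing_initialism_py_alt,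
                          pvSharedPrefix, hab] at hmem ⊢
                    rw [hmem]
                    simp [pvCandOK, pvInitialsA, pvInitialsB, List.headI, hba]
            | cons c cs =>
                -- |short| ≥ 2 and mismatch at the head: both sides are false
                have hk : ∀ k, pvCandOK (a :: c :: cs) (b :: bs) k = false := by
                  intro k
                  cases k with
                  | zero => simp [pvCandOK]
                  | succ m => simp [cand_succ, hab]
                simp [matches_trailing_initialism_py, matches_trailing_initialism_py_alt,
                      pvSharedPrefix, hab, hk]

-- ===== VERDICT (by name: the statement is the Claim_ definition above) =====
theorem matches_trailing_initialism_py_spec : Claim_equal_matches_trailing_initialism_py := by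
  intro s l _
  exact AB_eq s l
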